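-- pv_equiv track=rewrite | github.com/USomsiadZ/Python | praktyki 2023/formularz/formularz.py | woj
-- ===== SOURCE A (Python) =====
-- xx  = 0
--
-- woja =  {'id':0,'1':'Mazowieckie','ida':0},{'id':0,'1':'Wielkopolskie','ida':1},{'id':0,'1':'slaskie','ida':2},{'id':1,'1':'Ruskimal','ida':0}
--
-- keyo = []
--
-- def woj(a):
--     xx  = 0
--     keyo = []
--     for i in woja:
--         if i['id']==a:
--             keyo.insert(xx, xx)
--         xx = xx + 1
--     woj = [woja[key]['1'] for key in keyo]
--     wojid = [woja[key]['ida'] for key in keyo]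
--
--     return woj,wojid
-- ===== SOURCE B (Python) =====
-- woja =  {'id':0,'1':'Mazowieckie','ida':0},{'id':0,'1':'Wielkopolskie','ida':1},{'id':0,'1':'slaskie','ida':2},{'id':1,'1':'Ruskimal','ida':0}
--
-- def woj(a):
--     names = []
--     ids = []
--     for row in woja:
--         if row['id'] == a:
--             names.append(row['1'])
--             ids.append(row['ida'])
--     return names, ids
-- ===== Notes on version B (the rewrite author's own statement) =====
-- stated objective: simpler
-- what changed: Single pass collecting names and ids directly, replacing A's index-list build plus two separate indexing comprehensions.
import Mathlib
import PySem

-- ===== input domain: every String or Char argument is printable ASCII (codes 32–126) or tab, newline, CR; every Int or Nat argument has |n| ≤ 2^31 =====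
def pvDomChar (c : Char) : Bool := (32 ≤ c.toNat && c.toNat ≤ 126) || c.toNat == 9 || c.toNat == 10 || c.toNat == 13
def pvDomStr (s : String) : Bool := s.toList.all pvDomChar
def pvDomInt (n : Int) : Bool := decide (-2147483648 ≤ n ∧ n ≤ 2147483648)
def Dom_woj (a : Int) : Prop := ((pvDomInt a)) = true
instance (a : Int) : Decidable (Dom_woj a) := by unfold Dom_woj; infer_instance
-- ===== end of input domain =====

-- B is one pass appending names and ids directly (simpler); A builds an index list then runs two comprehensions.

-- ===== PORT A =====
-- the module-level constant woja: each dict row becomes the triple (id, '1', ida)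
def pvWoja : List (Int × String × Int) :=
  [(0, "Mazowieckie", 0), (0, "Wielkopolskie", 1), (0, "slaskie", 2), (1, "Ruskimal", 0)]

-- loop: xx counts rows, keyo.insert(xx, xx) via PySem.List.insert; then two
-- comprehensions index woja by key. pyGet? never misses here (keys are in-range
-- loop indices), so the .getD defaults are never used — exact on all inputs.
def woj (a : Int) : List String × List Int :=
  let st := pvWoja.foldl
    (fun (st : Int × List Int) i =>
      let keyo := if i.1 == a then PySem.List.insert st.2 st.1 st.1 else st.2
      (st.1 + 1, keyo)) (0, [])
  let names := st.2.map (fun key => ((PySem.List.pyGet? pvWoja key).map (·.2.1)).getD "")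
  let ids := st.2.map (fun key => ((PySem.List.pyGet? pvWoja key).map (·.2.2)).getD 0)
  (names, ids)

-- ===== PORT B =====
def woj_alt (a : Int) : List String × List Int :=
  pvWoja.foldl
    (fun (acc : List String × List Int) row =>
      if row.1 == a then (acc.1 ++ [row.2.1], acc.2 ++ [row.2.2]) else acc)
    ([], [])

-- ===== PRECONDITION & SPEC =====
def Spec_woj (a : Int) (out : List String × List Int) : Prop := out = woj_alt a
instance (a : Int) (out : List String × List Int) : Decidable (Spec_woj a out) := by unfold Spec_woj; infer_instance

-- ===== CLAIM (what is proved, stated in full; the proofs are below) =====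
def Claim_equal_woj : Prop := ∀ (a : Int), Dom_woj a → Spec_woj a (woj a)

-- ===== LEMMAS AND PROOFS =====

-- ===== VERDICT (by name: the statement is the Claim_ definition above) =====
theorem woj_spec : Claim_equal_woj := by
  intro a _
  unfold Spec_woj
  by_cases h0 : a = 0
  · subst h0; decide
  · by_cases h1 : a = 1
    · subst h1; decide
    · simp [woj, woj_alt, pvWoja, List.foldl, beq_iff_eq, Ne.symm h0, Ne.symm h1]
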